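-- pv_equiv track=rewrite | github.com/oli-loades/advent-2024 | 2/main.py | safe_with_removal
-- ===== SOURCE A (Python) =====
-- def row_safe(list):
--     if list != sorted(list) and list != sorted(list, reverse=True):
--         return False
--
--     for x in range(len(list)-1):
--         if not 1<=abs(list[x]-list[x+1])<=3:
--             return False
--     return True
--
-- def safe_with_removal(list):
--     if (row_safe(list) == False):
--         for x in range(len(list)):
--             new_list = list[:x] + list[x+1:]
--             if row_safe(new_list) == True:
--                 return True
--         return False
--     else:
--         return True
-- ===== SOURCE B (Python) =====
-- def safe_with_removal(list):
--     def first_bad(vals, lo, hi):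
--         # index of the first adjacent pair whose difference is outside [lo, hi], else None
--         for i, (a, b) in enumerate(zip(vals, vals[1:])):
--             if not (lo <= b - a <= hi):
--                 return i
--         return None
--
--     def direction_ok(lo, hi):
--         i = first_bad(list, lo, hi)
--         if i is None:
--             return True
--         for j in (i, i + 1):
--             if first_bad(list[:j] + list[j + 1:], lo, hi) is None:
--                 return True
--         return False
--
--     return direction_ok(1, 3) or direction_ok(-3, -1)
-- ===== Notes on version B (the rewrite author's own statement) =====
-- stated objective: faster
-- what changed: replaces A's sort-based safety check plus trying all n removals (each rebuilding and re-sorting a list) with one linear scan per direction that finds the first bad adjacent pair and tests only the two candidate removals at it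
import Mathlib
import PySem

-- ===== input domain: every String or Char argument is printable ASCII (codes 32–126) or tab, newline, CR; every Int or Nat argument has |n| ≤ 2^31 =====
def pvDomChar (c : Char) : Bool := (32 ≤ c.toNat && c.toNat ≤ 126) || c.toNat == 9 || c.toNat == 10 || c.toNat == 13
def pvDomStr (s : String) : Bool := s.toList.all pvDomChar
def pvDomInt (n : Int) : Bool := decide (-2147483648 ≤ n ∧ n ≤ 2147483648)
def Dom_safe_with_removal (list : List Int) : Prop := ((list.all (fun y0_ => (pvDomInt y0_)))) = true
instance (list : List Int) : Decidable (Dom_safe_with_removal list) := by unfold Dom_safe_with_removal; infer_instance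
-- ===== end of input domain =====

-- B replaces A's sort-based check and its loop over all n removals by one linear pass per
-- direction that tests only the two candidate removals at the first bad adjacent pair (faster).

-- ===== PORT A =====
def row_safe (list : List Int) : Bool :=
  if list ≠ PySem.List.sorted list (fun x => x) false ∧
     list ≠ PySem.List.sorted list (fun x => x) true then false
  else
    -- for x in range(len(list)-1): if not 1<=abs(list[x]-list[x+1])<=3: return False
    (PySem.List.pyRange 0 ((list.length : Int) - 1) 1).all (fun x =>
      decide (1 ≤ |PySem.List.pyGetD list x 0 - PySem.List.pyGetD list (x + 1) 0| ∧
              |PySem.List.pyGetD list x 0 - PySem.List.pyGetD list (x + 1) 0| ≤ 3))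

def safe_with_removal (list : List Int) : Bool :=
  if row_safe list = false then
    -- for x in range(len(list)): new_list = list[:x] + list[x+1:]; if row_safe(new_list): return True
    (PySem.List.pyRange 0 (list.length : Int) 1).any (fun x =>
      row_safe (PySem.List.slice list none (some x) ++ PySem.List.slice list (some (x + 1)) none))
  else true

-- ===== PORT B =====
-- first_bad(vals, lo, hi): index of first adjacent pair with difference outside [lo, hi]
def altFirstBad (lo hi : Int) : List Int → Option Nat
  | a :: b :: t =>
      if ¬ (lo ≤ b - a ∧ b - a ≤ hi) then some 0
      else (altFirstBad lo hi (b :: t)).map (· + 1)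
  | _ => none

-- list[:j] + list[j+1:]
def altRemoveAt (l : List Int) (j : Nat) : List Int := l.take j ++ l.drop (j + 1)

def altDirectionOk (list : List Int) (lo hi : Int) : Bool :=
  match altFirstBad lo hi list with
  | none => true
  | some i =>
      (altFirstBad lo hi (altRemoveAt list i)).isNone ||
      (altFirstBad lo hi (altRemoveAt list (i + 1))).isNone

def safe_with_removal_alt (list : List Int) : Bool :=
  altDirectionOk list 1 3 || altDirectionOk list (-3) (-1)

-- ===== PRECONDITION & SPEC =====
def Spec_safe_with_removal (list : List Int) (out : Bool) : Prop := out = safe_with_removal_alt list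
instance (list : List Int) (out : Bool) : Decidable (Spec_safe_with_removal list out) := by unfold Spec_safe_with_removal; infer_instance

-- ===== CLAIM (what is proved, stated in full; the proofs are below) =====
def Claim_equal_safe_with_removal : Prop := ∀ (list : List Int), Dom_safe_with_removal list → Spec_safe_with_removal list (safe_with_removal list)

-- ===== LEMMAS AND PROOFS =====

-- adjacency predicate both sides are really about
def Adj (lo hi : Int) (l : List Int) : Prop := l.IsChain (fun a b => lo ≤ b - a ∧ b - a ≤ hi)

lemma altRemoveAt_zero_cons (a : Int) (l : List Int) : altRemoveAt (a :: l) 0 = l := by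
  simp [altRemoveAt]

lemma altRemoveAt_succ_cons (a : Int) (l : List Int) (j : Nat) :
    altRemoveAt (a :: l) (j + 1) = a :: altRemoveAt l j := by
  simp [altRemoveAt]

lemma adj_nil (lo hi : Int) : Adj lo hi [] := List.IsChain.nil

lemma adj_singleton (lo hi a : Int) : Adj lo hi [a] := List.IsChain.singleton a

lemma adj_cons_cons {lo hi a b : Int} {t : List Int} :
    Adj lo hi (a :: b :: t) ↔ (lo ≤ b - a ∧ b - a ≤ hi) ∧ Adj lo hi (b :: t) :=
  List.isChain_cons_cons

lemma adj_tail {lo hi a : Int} {l : List Int} (h : Adj lo hi (a :: l)) : Adj lo hi l :=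
  List.IsChain.tail h

lemma altFirstBad_none_iff (lo hi : Int) (l : List Int) :
    altFirstBad lo hi l = none ↔ Adj lo hi l := by
  induction l with
  | nil => simpa [altFirstBad] using adj_nil lo hi
  | cons a t ih =>
    cases t with
    | nil => simpa [altFirstBad] using adj_singleton lo hi a
    | cons b t' =>
      rw [altFirstBad, adj_cons_cons]
      by_cases hp : lo ≤ b - a ∧ b - a ≤ hi
      · rw [if_neg (not_not_intro hp), Option.map_eq_none_iff, ih]
        tauto
      · rw [if_pos hp]
        exact iff_of_false (by simp) (fun hc => hp hc.1)

lemma altFirstBad_some_lt (lo hi : Int) {l : List Int} {i : Nat}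
    (h : altFirstBad lo hi l = some i) : i + 1 < l.length := by
  induction l generalizing i with
  | nil => simp [altFirstBad] at h
  | cons a t ih =>
    cases t with
    | nil => simp [altFirstBad] at h
    | cons b t' =>
      rw [altFirstBad] at h
      by_cases hp : lo ≤ b - a ∧ b - a ≤ hi
      · rw [if_neg (not_not_intro hp), Option.map_eq_some_iff] at h
        obtain ⟨k, hk, rfl⟩ := h
        have := ih hk
        simp at this ⊢
        omega
      · rw [if_pos hp] at h
        injection h with h0
        simp [← h0]

lemma not_adj_removeAt (lo hi : Int) {l : List Int} {i : Nat}
    (h : altFirstBad lo hi l = some i) :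
    ∀ j : Nat, j ≠ i → j ≠ i + 1 → ¬ Adj lo hi (altRemoveAt l j) := by
  induction l generalizing i with
  | nil => simp [altFirstBad] at h
  | cons a t ih =>
    cases t with
    | nil => simp [altFirstBad] at h
    | cons b t' =>
      rw [altFirstBad] at h
      by_cases hp : lo ≤ b - a ∧ b - a ≤ hi
      case neg =>
        -- first pair already bad: i = 0, so j ≥ 2 keeps a, b adjacent
        rw [if_pos hp] at h
        injection h with h0
        intro j hj0 hj1
        obtain ⟨j', rfl⟩ : ∃ j', j = j' + 2 := ⟨j - 2, by omega⟩
        rw [altRemoveAt_succ_cons, altRemoveAt_succ_cons]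
        intro hadj
        exact hp (adj_cons_cons.mp hadj).1
      case pos =>
        rw [if_neg (not_not_intro hp), Option.map_eq_some_iff] at h
        obtain ⟨k, hk, rfl⟩ := h
        intro j hj0 hj1
        cases j with
        | zero =>
          rw [altRemoveAt_zero_cons]
          intro hadj
          rw [← altFirstBad_none_iff] at hadj
          simp [hadj] at hk
        | succ j' =>
          rw [altRemoveAt_succ_cons]
          intro hadj
          exact ih hk j' (by omega) (by omega) (adj_tail hadj)

-- the gap condition of row_safe's loop, index form
def Gap (l : List Int) : Prop :=
  ∀ i : Nat, (h : i + 1 < l.length) →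
    1 ≤ |l[i] - l[i + 1]| ∧ |l[i] - l[i + 1]| ≤ 3

lemma sortedAsc_iff (l : List Int) :
    l = PySem.List.sorted l (fun x => x) false ↔ l.Pairwise (· ≤ ·) := by
  constructor
  · intro h
    have := PySem.List.sorted_pairwise l (fun x => x)
    rw [← h] at this
    exact this
  · intro h
    exact (PySem.List.sorted_eq_self_of_pairwise l (fun x => x) h).symm

lemma sortedDesc_iff (l : List Int) :
    l = PySem.List.sorted l (fun x => x) true ↔ l.Pairwise (fun a b => b ≤ a) := by
  constructor
  · intro h
    have := PySem.List.sorted_pairwise_rev l (fun x => x)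
    rw [← h] at this
    exact this
  · intro h
    exact (PySem.List.sorted_rev_eq_self_of_pairwise l (fun x => x) h).symm

lemma adj13_of (l : List Int) (hp : l.Pairwise (· ≤ ·)) (hg : Gap l) : Adj 1 3 l := by
  have hc : l.IsChain (· ≤ ·) := List.isChain_iff_pairwise.mpr hp
  rw [List.isChain_iff_getElem] at hc
  unfold Adj
  rw [List.isChain_iff_getElem]
  intro i hi
  have h1 := hc i hi
  have h2 := hg i hi
  rcases abs_cases (l[i] - l[i + 1]) with ⟨ha, _⟩ | ⟨ha, _⟩ <;> omega

lemma adjDesc_of (l : List Int) (hp : l.Pairwise (fun a b => b ≤ a)) (hg : Gap l) :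
    Adj (-3) (-1) l := by
  have hc : l.IsChain (fun a b => b ≤ a) := List.isChain_iff_pairwise.mpr hp
  rw [List.isChain_iff_getElem] at hc
  unfold Adj
  rw [List.isChain_iff_getElem]
  intro i hi
  have h1 := hc i hi
  have h2 := hg i hi
  rcases abs_cases (l[i] - l[i + 1]) with ⟨ha, _⟩ | ⟨ha, _⟩ <;> omega

lemma pairwise_le_of_adj13 (l : List Int) (h : Adj 1 3 l) : l.Pairwise (· ≤ ·) := by
  rw [← List.isChain_iff_pairwise]
  exact h.imp (fun {a b} hab => by omega)

lemma pairwise_ge_of_adjDesc (l : List Int) (h : Adj (-3) (-1) l) :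
    l.Pairwise (fun a b => b ≤ a) := by
  rw [← List.isChain_iff_pairwise]
  exact h.imp (fun {a b} hab => by omega)

lemma gap_of_adj (lo hi : Int) (l : List Int) (h : Adj lo hi l)
    (hlo : 1 ≤ lo ∨ hi ≤ -1) (hb : -3 ≤ lo) (hb' : hi ≤ 3) : Gap l := by
  unfold Adj at h
  rw [List.isChain_iff_getElem] at h
  intro i hi'
  have := h i hi'
  rcases abs_cases (l[i] - l[i + 1]) with ⟨ha, _⟩ | ⟨ha, _⟩ <;> omega

-- the loop of row_safe, index form
lemma gapAll_iff (l : List Int) :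
    ((PySem.List.pyRange 0 ((l.length : Int) - 1) 1).all (fun x =>
      decide (1 ≤ |PySem.List.pyGetD l x 0 - PySem.List.pyGetD l (x + 1) 0| ∧
              |PySem.List.pyGetD l x 0 - PySem.List.pyGetD l (x + 1) 0| ≤ 3))) = true ↔
    Gap l := by
  rw [PySem.List.pyRange_one, List.all_map, List.all_eq_true]
  unfold Gap
  constructor
  · intro h i hi
    have := h i (by rw [List.mem_range]; omega)
    simp only [Function.comp_apply, zero_add, decide_eq_true_eq] at this
    rw [show ((i : Int) + 1) = ((i + 1 : Nat) : Int) by push_cast; ring] at this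
    rw [PySem.List.pyGetD_natCast, PySem.List.pyGetD_natCast] at this
    rw [List.getD_eq_getElem l 0 (by omega), List.getD_eq_getElem l 0 hi] at this
    exact this
  · intro h k hk
    rw [List.mem_range] at hk
    have hk' : k + 1 < l.length := by omega
    have := h k hk'
    simp only [Function.comp_apply, zero_add, decide_eq_true_eq]
    rw [show ((k : Int) + 1) = ((k + 1 : Nat) : Int) by push_cast; ring]
    rw [PySem.List.pyGetD_natCast, PySem.List.pyGetD_natCast]
    rw [List.getD_eq_getElem l 0 (by omega), List.getD_eq_getElem l 0 hk']
    exact this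

lemma row_safe_iff (l : List Int) :
    row_safe l = true ↔ Adj 1 3 l ∨ Adj (-3) (-1) l := by
  unfold row_safe
  split_ifs with hs
  · refine iff_of_false (by simp) ?_
    rintro (h | h)
    · exact hs.1 ((sortedAsc_iff l).mpr (pairwise_le_of_adj13 l h))
    · exact hs.2 ((sortedDesc_iff l).mpr (pairwise_ge_of_adjDesc l h))
  · rw [not_and_or, not_ne_iff, not_ne_iff] at hs
    rw [gapAll_iff]
    constructor
    · intro hg
      rcases hs with h | h
      · exact Or.inl (adj13_of l ((sortedAsc_iff l).mp h) hg)
      · exact Or.inr (adjDesc_of l ((sortedDesc_iff l).mp h) hg)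
    · rintro (h | h)
      · exact gap_of_adj 1 3 l h (Or.inl le_rfl) (by omega) le_rfl
      · exact gap_of_adj (-3) (-1) l h (Or.inr le_rfl) le_rfl (by omega)

lemma safe_with_removal_iff (l : List Int) :
    safe_with_removal l = true ↔
      (Adj 1 3 l ∨ Adj (-3) (-1) l) ∨
      ∃ k : Nat, k < l.length ∧ (Adj 1 3 (altRemoveAt l k) ∨ Adj (-3) (-1) (altRemoveAt l k)) := by
  have hslice : ∀ x : Int, 0 ≤ x →
      PySem.List.slice l none (some x) ++ PySem.List.slice l (some (x + 1)) none =
        altRemoveAt l x.toNat := by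
    intro x hx
    rw [PySem.List.slice_to l hx, PySem.List.slice_from l (by omega : (0:Int) ≤ x + 1), altRemoveAt,
        show (x + 1).toNat = x.toNat + 1 by omega]
  unfold safe_with_removal
  by_cases hr : row_safe l = true
  · rw [if_neg (by simp [hr])]
    exact iff_of_true rfl (Or.inl ((row_safe_iff l).mp hr))
  · have hrf : row_safe l = false := by simpa using hr
    rw [if_pos hrf, List.any_eq_true]
    have hno : ¬ (Adj 1 3 l ∨ Adj (-3) (-1) l) := fun h => hr ((row_safe_iff l).mpr h)
    constructor
    · rintro ⟨x, hx, hrow⟩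
      rw [PySem.List.mem_pyRange_one] at hx
      rw [hslice x hx.1, row_safe_iff] at hrow
      exact Or.inr ⟨x.toNat, by omega, hrow⟩
    · rintro (h | ⟨k, hk, h⟩)
      · exact absurd h hno
      · refine ⟨(k : Int), ?_, ?_⟩
        · rw [PySem.List.mem_pyRange_one]
          constructor <;> omega
        · rw [hslice (k : Int) (by omega), row_safe_iff]
          simpa using h

lemma altDirectionOk_iff (l : List Int) (lo hi : Int) :
    altDirectionOk l lo hi = true ↔
      Adj lo hi l ∨ ∃ k : Nat, k < l.length ∧ Adj lo hi (altRemoveAt l k) := by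
  unfold altDirectionOk
  cases hfb : altFirstBad lo hi l with
  | none => exact iff_of_true rfl (Or.inl ((altFirstBad_none_iff lo hi l).mp hfb))
  | some i =>
    have hi1 := altFirstBad_some_lt lo hi hfb
    have hnl : ¬ Adj lo hi l := by
      rw [← altFirstBad_none_iff, hfb]
      simp
    simp only [Bool.or_eq_true, Option.isNone_iff_eq_none, altFirstBad_none_iff]
    constructor
    · rintro (h | h)
      · exact Or.inr ⟨i, by omega, h⟩
      · exact Or.inr ⟨i + 1, by omega, h⟩
    · rintro (h | ⟨k, hk, h⟩)
      · exact absurd h hnl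
      · by_cases hki : k = i
        · subst hki; exact Or.inl h
        · by_cases hki1 : k = i + 1
          · subst hki1; exact Or.inr h
          · exact absurd h (not_adj_removeAt lo hi hfb k hki hki1)

-- ===== VERDICT (by name: the statement is the Claim_ definition above) =====
theorem safe_with_removal_spec : Claim_equal_safe_with_removal := by
  intro l _
  unfold Spec_safe_with_removal
  rw [Bool.eq_iff_iff, safe_with_removal_iff]
  unfold safe_with_removal_alt
  rw [Bool.or_eq_true, altDirectionOk_iff, altDirectionOk_iff]
  simp only [and_or_left, exists_or]
  exact or_or_or_comm
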